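-- pv_equiv track=rewrite | github.com/syntra-vindevoy/python-1 | extra/find_letter_bounds.py | find_letter_bounds_bis
-- ===== SOURCE A (Python) =====
-- import string
--
-- def find_letter_bounds_bis(sentence: str) -> tuple:
--     # ~= Yves' solution
--     low = high = None
--     for char in sentence:
--         if char in string.ascii_letters:
--             if not any((low, high)):
--                 low = high = char
--                 continue
--             if char < low:
--                 low = char
--             if char > high:
--                 high = char
--     return low, high
-- ===== SOURCE B (Python) =====
-- import string
--
-- def find_letter_bounds_bis(sentence: str) -> tuple:
--     letters = [char for char in sentence if char in string.ascii_letters]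
--     if not letters:
--         return None, None
--     return min(letters), max(letters)
-- ===== Notes on version B (the rewrite author's own statement) =====
-- stated objective: simpler
-- what changed: B filters the ASCII letters out of the sentence once and then takes two separate built-in reductions (min and max) over that list, instead of A's single fused loop that threads low/high state with an any()-based first-letter guard.
import Mathlib
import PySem

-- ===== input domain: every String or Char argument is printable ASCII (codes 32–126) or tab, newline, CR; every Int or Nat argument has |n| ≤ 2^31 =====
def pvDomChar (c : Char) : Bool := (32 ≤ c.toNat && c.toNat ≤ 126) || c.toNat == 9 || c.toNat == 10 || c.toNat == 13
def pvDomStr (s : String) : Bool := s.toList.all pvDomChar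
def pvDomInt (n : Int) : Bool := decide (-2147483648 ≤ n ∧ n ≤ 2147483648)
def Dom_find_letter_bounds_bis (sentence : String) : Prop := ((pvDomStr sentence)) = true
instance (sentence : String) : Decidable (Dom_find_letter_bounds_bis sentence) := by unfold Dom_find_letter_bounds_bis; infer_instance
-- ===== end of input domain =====

-- B replaces A's fused low/high loop (with its any() first-letter guard) by a single filter
-- of the ASCII letters followed by two separate min/max reductions; objective: simpler.

-- ===== PORT A =====
-- `char in string.ascii_letters` for a single character = membership in the letters.
def pvAsciiLetters : List Char :=
  "abcdefghijklmnopqrstuvwxyzABCDEFGHIJKLMNOPQRSTUVWXYZ".toList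

-- one iteration of A's for-loop; state = (low, high), Python chars held as Char
def pvStepA (st : Option Char × Option Char) (c : Char) : Option Char × Option Char :=
  if pvAsciiLetters.contains c then
    -- `if not any((low, high))`: both are still None
    if st.1 = none ∧ st.2 = none then (some c, some c)
    else
      ( match st.1 with
        | some l => if c < l then some c else some l
        | none => none
      , match st.2 with
        | some h => if c > h then some c else some h
        | none => none )
  else st

def find_letter_bounds_bis (sentence : String) : Option String × Option String :=
  let st := sentence.toList.foldl pvStepA (none, none)
  (st.1.map (fun c => String.ofList [c]), st.2.map (fun c => String.ofList [c]))

-- ===== PORT B =====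
def find_letter_bounds_bis_alt (sentence : String) : Option String × Option String :=
  let letters := sentence.toList.filter (fun c => pvAsciiLetters.contains c)
  match letters.min?, letters.max? with
  | some l, some h => (some (String.ofList [l]), some (String.ofList [h]))
  | _, _ => (none, none)

-- ===== PRECONDITION & SPEC =====
def Spec_find_letter_bounds_bis (sentence : String) (out : Option String × Option String) : Prop := out = find_letter_bounds_bis_alt sentence
instance (sentence : String) (out : Option String × Option String) : Decidable (Spec_find_letter_bounds_bis sentence out) := by unfold Spec_find_letter_bounds_bis; infer_instance

-- ===== CLAIM (what is proved, stated in full; the proofs are below) =====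
def Claim_equal_find_letter_bounds_bis : Prop := ∀ (sentence : String), Dom_find_letter_bounds_bis sentence → Spec_find_letter_bounds_bis sentence (find_letter_bounds_bis sentence)

-- ===== LEMMAS AND PROOFS =====

-- min/max as A's comparison-and-assign writes them
theorem pvIfMin (m c : Char) : (if c < m then some c else some m) = some (min m c) := by
  rw [min_def]; split_ifs with h1 h2 h2
  · exact congrArg some (le_antisymm h1.le h2)
  · rfl
  · rfl
  · exact absurd (not_le.mp h2) h1

theorem pvIfMax (M c : Char) : (if M < c then some c else some M) = some (max M c) := by
  rw [max_def]; split_ifs with h1 h2 h2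
  · rfl
  · exact absurd h1.le h2
  · exact congrArg some (le_antisymm h2 (not_lt.mp h1))
  · rfl

-- Once both components are some, A's step keeps running min/max of the letters seen.
theorem pvFoldA_some (l : List Char) (m M : Char) :
    l.foldl pvStepA (some m, some M) =
      (some ((l.filter (fun c => pvAsciiLetters.contains c)).foldl min m),
       some ((l.filter (fun c => pvAsciiLetters.contains c)).foldl max M)) := by
  induction l generalizing m M with
  | nil => simp
  | cons c l ih =>
    by_cases h : pvAsciiLetters.contains c = true
    · have hm : c ∈ pvAsciiLetters := by simpa using h
      simp only [List.foldl_cons, List.filter_cons, h, if_pos]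
      rw [show pvStepA (some m, some M) c = (some (min m c), some (max M c)) by
        simp [pvStepA, hm, pvIfMin, pvIfMax]]
      exact ih (min m c) (max M c)
    · have hm : c ∉ pvAsciiLetters := by simpa using h
      simp only [List.foldl_cons, List.filter_cons, h, if_neg, Bool.false_eq_true,
        not_false_iff]
      rw [show pvStepA (some m, some M) c = (some m, some M) by simp [pvStepA, hm]]
      exact ih m M

theorem pvFoldA_none (l : List Char) :
    l.foldl pvStepA (none, none) =
      match (l.filter (fun c => pvAsciiLetters.contains c)).min?,
            (l.filter (fun c => pvAsciiLetters.contains c)).max? with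
      | some lo, some hi => (some lo, some hi)
      | _, _ => (none, none) := by
  induction l with
  | nil => simp
  | cons c l ih =>
    by_cases h : pvAsciiLetters.contains c = true
    · have hm : c ∈ pvAsciiLetters := by simpa using h
      simp only [List.foldl_cons, List.filter_cons, h, if_pos]
      rw [show pvStepA (none, none) c = (some c, some c) by simp [pvStepA, hm]]
      rw [pvFoldA_some]
      simp [List.min?, List.max?]
    · have hm : c ∉ pvAsciiLetters := by simpa using h
      simp only [List.foldl_cons, List.filter_cons, h, if_neg, Bool.false_eq_true,
        not_false_iff]
      rw [show pvStepA (none, none) c = (none, none) by simp [pvStepA, hm]]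
      exact ih

-- ===== VERDICT (by name: the statement is the Claim_ definition above) =====
theorem find_letter_bounds_bis_spec : Claim_equal_find_letter_bounds_bis := by
  intro sentence _
  unfold Spec_find_letter_bounds_bis
  simp only [find_letter_bounds_bis, find_letter_bounds_bis_alt]
  rw [pvFoldA_none]
  cases hl : sentence.toList.filter (fun c => pvAsciiLetters.contains c) with
  | nil => rfl
  | cons a rest => simp [List.min?, List.max?]
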